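-- pv_equiv track=rewrite | github.com/SonJoseph/algorithms | companies/brex.py | findsuspiciousactivities
-- ===== SOURCE A (Python) =====
-- from collections import deque
--
-- def findsuspiciousactivities(suspicious_activities: list, new_activities: list, k: int) -> list:
--     # convert to sets
--     suspicious_activities = deque([set(s) for s in suspicious_activities])
--     new_activities = [set(s) for s in new_activities]
--     final_suspicious_activities = []
--
--     # assume all activities are of the same length
--     # m = len(suspicious_activities[0])
--
--     # process all new suspicious_activities that can cause new_activities to be added
--     while suspicious_activities:
--         suspicious_activity = suspicious_activities.popleft()
--
--         remaining_activities = []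
--         for new_activity in new_activities:
--             '''
--             set A & B gives you elements in common, can handle sets of different lengths.
--              - Use this for finding overlaps between sets vs. set subtraction!
--
--             {"Brad", "San Francisco", "withdraw"} & {"Diana", "San Francisco", "withdraw", "Seattle"}
--             '''
--             if len(new_activity & suspicious_activity) >= k:
--                 suspicious_activities.append(new_activity)
--                 # we can also remove this new_activity
--             else:
--                 remaining_activities.append(new_activity)
--
--         new_activities = remaining_activities
--
--         # so that we're not updating collection mid-iteration.
--         # can clean this up by creating  new list that contains the items we wont remove during the loop.
--         #new_activities = [new_activities[i] for i in range(len(new_activities)) if i not in remove_activities]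
--
--         final_suspicious_activities.append(suspicious_activity)
--
--     return final_suspicious_activities
-- ===== SOURCE B (Python) =====
-- from collections import Counter
--
-- def findsuspiciousactivities(suspicious_activities: list, new_activities: list, k: int) -> list:
--     # Inverted index: element -> list of pool indices (ascending) whose activity contains it.
--     pool = [set(a) for a in new_activities]
--     index = {}
--     for i, act in enumerate(pool):
--         for e in act:
--             index[e] = index.get(e, []) + [i]
--
--     alive = list(range(len(pool)))
--     queue = [set(s) for s in suspicious_activities]
--     result = []
--     qi = 0
--     while qi < len(queue):
--         cur = queue[qi]
--         qi += 1
--         # overlap counts, computed only over candidate indices sharing an element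
--         counts = Counter(i for e in cur for i in index.get(e, []))
--         matched = [i for i in alive if counts.get(i, 0) >= k]
--         alive = [i for i in alive if counts.get(i, 0) < k]
--         queue.extend(pool[i] for i in matched)
--         result.append(cur)
--     return result
-- ===== Notes on version B (the rewrite author's own statement) =====
-- stated objective: faster
-- what changed: Replaces A's per-pop rescan that intersects every remaining activity with the popped set by a one-time inverted index element->activity indices plus a Counter over candidate indices, so each pop touches only activities sharing an element.
import Mathlib
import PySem

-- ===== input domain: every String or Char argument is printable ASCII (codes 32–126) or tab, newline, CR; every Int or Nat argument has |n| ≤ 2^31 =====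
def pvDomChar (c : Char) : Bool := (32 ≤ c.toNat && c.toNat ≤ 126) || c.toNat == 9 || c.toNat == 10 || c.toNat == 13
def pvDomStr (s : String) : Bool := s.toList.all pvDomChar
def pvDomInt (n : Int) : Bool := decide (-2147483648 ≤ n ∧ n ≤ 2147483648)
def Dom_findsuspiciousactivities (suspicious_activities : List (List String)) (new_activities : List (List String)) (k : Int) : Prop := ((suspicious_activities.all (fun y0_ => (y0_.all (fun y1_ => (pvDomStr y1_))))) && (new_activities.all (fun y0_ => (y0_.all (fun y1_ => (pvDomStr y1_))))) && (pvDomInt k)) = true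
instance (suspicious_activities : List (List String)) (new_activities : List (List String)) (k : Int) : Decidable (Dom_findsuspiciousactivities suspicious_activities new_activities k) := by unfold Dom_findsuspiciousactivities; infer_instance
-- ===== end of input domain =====

-- B replaces A's per-pair set intersections with an inverted index element→activity indices,
-- counting overlaps only over candidate activities that share an element (objective: faster).

-- ===== PORT A =====
-- one round of A's inner for-loop: partition the remaining new activities against the popped one
def pvStepA (k : Int) (cur : PySem.Set String) (rest news : List (PySem.Set String)) :
    List (PySem.Set String) × List (PySem.Set String) :=
  news.foldl
    (fun s a => if k ≤ PySem.Set.len (PySem.Set.inter a cur) then (s.1 ++ [a], s.2) else (s.1, s.2 ++ [a]))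
    (rest, [])

-- A's partition loop is two filters (cited by pvGoA's termination proof and by the main proof)
theorem pvPartitionFoldl {α : Type} (p : α → Prop) [DecidablePred p] (l q r : List α) :
    l.foldl (fun s a => if p a then (s.1 ++ [a], s.2) else (s.1, s.2 ++ [a])) (q, r)
      = (q ++ l.filter (fun a => decide (p a)), r ++ l.filter (fun a => !decide (p a))) := by
  induction l generalizing q r with
  | nil => simp
  | cons a l ih =>
    by_cases h : p a <;> simp [h, ih]

theorem pvStepA_eq (k : Int) (cur : PySem.Set String) (rest news : List (PySem.Set String)) :
    pvStepA k cur rest news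
      = (rest ++ news.filter (fun a => decide (k ≤ PySem.Set.len (PySem.Set.inter a cur))),
         news.filter (fun a => !decide (k ≤ PySem.Set.len (PySem.Set.inter a cur)))) := by
  have := pvPartitionFoldl (fun a => k ≤ PySem.Set.len (PySem.Set.inter a cur)) news rest []
  simpa [pvStepA] using this

theorem pvStepA_len (k : Int) (cur : PySem.Set String) (rest news : List (PySem.Set String)) :
    (pvStepA k cur rest news).1.length + (pvStepA k cur rest news).2.length
      = rest.length + news.length := by
  rw [pvStepA_eq]
  have := List.length_eq_length_filter_add (l := news)
    (fun a => decide (k ≤ PySem.Set.len (PySem.Set.inter a cur)))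
  simp only [List.length_append]
  omega

def pvGoA (k : Int) : List (PySem.Set String) → List (PySem.Set String) → List (PySem.Set String) → List (PySem.Set String)
  | [], _, acc => acc
  | cur :: rest, news, acc =>
    pvGoA k (pvStepA k cur rest news).1 (pvStepA k cur rest news).2 (acc ++ [cur])
termination_by q news _ => q.length + news.length
decreasing_by
  have := pvStepA_len k cur rest news
  simp only [List.length_cons]
  omega

def findsuspiciousactivities (suspicious_activities : List (List String)) (new_activities : List (List String)) (k : Int) : List (List String) :=
  pvGoA k (suspicious_activities.map (fun s => PySem.Set.ofList s)) (new_activities.map (fun s => PySem.Set.ofList s)) []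

-- ===== PORT B =====
-- B's overlap counter for one popped activity: Counter(i for e in cur for i in index.get(e, []))
def pvCountsB (index : PySem.Dict String (List Int)) (cur : PySem.Set String) : PySem.Dict Int Int :=
  PySem.Dict.counter (cur.flatMap (fun e => index.getD e []))

-- one round of B's loop body: (queue extension, surviving alive indices)
def pvStepB (k : Int) (pool : List (PySem.Set String)) (index : PySem.Dict String (List Int))
    (cur : PySem.Set String) (rest : List (PySem.Set String)) (alive : List Int) :
    List (PySem.Set String) × List Int :=
  (rest ++ (alive.filter (fun i => decide (k ≤ (pvCountsB index cur).getD i 0))).map (fun i => PySem.List.pyGetD pool i []),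
   alive.filter (fun i => decide ((pvCountsB index cur).getD i 0 < k)))

theorem pvStepB_len (k : Int) (pool : List (PySem.Set String)) (index : PySem.Dict String (List Int))
    (cur : PySem.Set String) (rest : List (PySem.Set String)) (alive : List Int) :
    (pvStepB k pool index cur rest alive).1.length + (pvStepB k pool index cur rest alive).2.length
      = rest.length + alive.length := by
  have hnot : ∀ i ∈ alive, decide ((pvCountsB index cur).getD i 0 < k)
      = !decide (k ≤ (pvCountsB index cur).getD i 0) := by
    intro i _; simp [← decide_not]
  have := List.length_eq_length_filter_add (l := alive)
    (fun i => decide (k ≤ (pvCountsB index cur).getD i 0))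
  simp only [pvStepB, List.length_append, List.length_map]
  rw [List.filter_congr hnot]
  omega

def pvGoB (k : Int) (pool : List (PySem.Set String)) (index : PySem.Dict String (List Int)) :
    List (PySem.Set String) → List Int → List (PySem.Set String) → List (PySem.Set String)
  | [], _, acc => acc
  | cur :: rest, alive, acc =>
    pvGoB k pool index (pvStepB k pool index cur rest alive).1 (pvStepB k pool index cur rest alive).2 (acc ++ [cur])
termination_by q alive _ => q.length + alive.length
decreasing_by
  have := pvStepB_len k pool index cur rest alive
  simp only [List.length_cons]
  omega

def findsuspiciousactivities_alt (suspicious_activities : List (List String)) (new_activities : List (List String)) (k : Int) : List (List String) :=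
  let pool := new_activities.map (fun a => PySem.Set.ofList a)
  let index := (PySem.List.enumerate pool).foldl
    (fun d p => p.2.foldl (fun d e => d.modify e [] (· ++ [p.1])) d) PySem.Dict.empty
  pvGoB k pool index (suspicious_activities.map (fun s => PySem.Set.ofList s)) (PySem.List.pyRange 0 (PySem.List.len pool)) []

-- ===== PRECONDITION & SPEC =====
def Spec_findsuspiciousactivities (suspicious_activities : List (List String)) (new_activities : List (List String)) (k : Int) (out : List (List String)) : Prop := out = findsuspiciousactivities_alt suspicious_activities new_activities k
instance (suspicious_activities : List (List String)) (new_activities : List (List String)) (k : Int) (out : List (List String)) : Decidable (Spec_findsuspiciousactivities suspicious_activities new_activities k out) := by unfold Spec_findsuspiciousactivities; infer_instance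

-- ===== CLAIM (what is proved, stated in full; the proofs are below) =====
def Claim_equal_findsuspiciousactivities : Prop := ∀ (suspicious_activities : List (List String)) (new_activities : List (List String)) (k : Int), Dom_findsuspiciousactivities suspicious_activities new_activities k → Spec_findsuspiciousactivities suspicious_activities new_activities k (findsuspiciousactivities suspicious_activities new_activities k)

-- ===== LEMMAS AND PROOFS =====

-- the list the inverted index stores under element e: the (ascending) indices of pool activities containing e
def pvIdxList (s : Int) : List (PySem.Set String) → String → List Int
  | [], _ => []
  | a :: ps, e => (if e ∈ a then [s] else []) ++ pvIdxList (s + 1) ps e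

theorem pvInner (a : List String) (ha : a.Nodup) (v : Int) (d : PySem.Dict String (List Int)) (e : String) :
    (a.foldl (fun d e' => d.modify e' [] (· ++ [v])) d).getD e []
      = if e ∈ a then d.getD e [] ++ [v] else d.getD e [] := by
  induction a generalizing d with
  | nil => simp
  | cons x xs ih =>
    obtain ⟨hx, hxs⟩ := List.nodup_cons.mp ha
    simp only [List.foldl_cons]
    rw [ih hxs]
    by_cases hexx : e = x
    · subst hexx
      simp [hx, PySem.Dict.getD_modify_self]
    · simp [PySem.Dict.getD_modify_of_ne _ _ _ hexx, List.mem_cons, hexx]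

theorem pvBuild (pool : List (PySem.Set String)) (hp : ∀ a ∈ pool, List.Nodup a) :
    ∀ (s : Int) (d : PySem.Dict String (List Int)) (e : String),
    ((PySem.List.enumerate pool s).foldl
        (fun d p => p.2.foldl (fun d e' => d.modify e' [] (· ++ [p.1])) d) d).getD e []
      = d.getD e [] ++ pvIdxList s pool e := by
  induction pool with
  | nil => intro s d e; simp [PySem.List.enumerate_nil, pvIdxList]
  | cons a ps ih =>
    intro s d e
    rw [PySem.List.enumerate_cons]
    simp only [List.foldl_cons]
    rw [ih (fun x hx => hp x (List.mem_cons_of_mem _ hx)) (s + 1)]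
    rw [pvInner a (hp a List.mem_cons_self) s d e]
    by_cases he : e ∈ a <;> simp [pvIdxList, he, List.append_assoc]

theorem pvIdx_mem {pool : List (PySem.Set String)} {e : String} :
    ∀ {s x : Int}, x ∈ pvIdxList s pool e → s ≤ x := by
  induction pool with
  | nil => intro s x h; simp [pvIdxList] at h
  | cons a ps ih =>
    intro s x h
    simp only [pvIdxList, List.mem_append] at h
    rcases h with h | h
    · split at h <;> simp_all
    · have := ih h; omega

theorem pvIdx_count (pool : List (PySem.Set String)) :
    ∀ (s : Int) (e : String) (i : Nat), i < pool.length →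
    (pvIdxList s pool e).count (s + (i : Int)) = if e ∈ pool[i]! then 1 else 0 := by
  induction pool with
  | nil => intro s e i hi; simp at hi
  | cons a ps ih =>
    intro s e i hi
    cases i with
    | zero =>
      have htail : (pvIdxList (s + 1) ps e).count (s + ((0 : Nat) : Int)) = 0 := by
        refine List.count_eq_zero.mpr (fun h => ?_)
        have := pvIdx_mem h; omega
      simp only [pvIdxList, List.count_append, htail]
      by_cases he : e ∈ a <;> simp [he]
    | succ j =>
      have hhead : ((if e ∈ a then [s] else []) : List Int).count (s + ((j + 1 : Nat) : Int)) = 0 := by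
        refine List.count_eq_zero.mpr (fun h => ?_)
        by_cases he : e ∈ a <;> simp [he] at h
        omega
      simp only [pvIdxList, List.count_append, hhead]
      have := ih (s + 1) e j (by simpa using hi)
      rw [show s + ((j + 1 : Nat) : Int) = (s + 1) + (j : Int) by push_cast; ring]
      simpa using this

theorem pvSumIndicator (c : List String) (A : List String) :
    (c.map (fun e => if e ∈ A then 1 else 0)).sum = c.countP (fun e => decide (e ∈ A)) := by
  induction c with
  | nil => simp
  | cons x xs ih =>
    by_cases h : x ∈ A <;> simp [h, ih]; omega

theorem pvSymmCount (a c : List String) (ha : a.Nodup) (hc : c.Nodup) :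
    c.countP (fun e => decide (e ∈ a)) = (a.filter (fun x => c.contains x)).length := by
  rw [List.countP_eq_length_filter]
  have h1 : (a.filter (fun x => c.contains x)) = (a.filter (fun x => decide (x ∈ c))) :=
    List.filter_congr (fun x _ => by simp)
  rw [h1]
  refine (List.Perm.length_eq ?_).symm
  rw [List.perm_ext_iff_of_nodup (ha.filter _) (hc.filter _)]
  intro x
  simp [List.mem_filter, and_comm]

-- the overlap count B reads from its counter equals the intersection size A computes
theorem pvCounts (pool : List (PySem.Set String)) (index : PySem.Dict String (List Int))
    (hp : ∀ a ∈ pool, List.Nodup a)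
    (hidx : ∀ e, index.getD e [] = pvIdxList 0 pool e)
    (cur : PySem.Set String) (hcur : List.Nodup cur)
    (i : Int) (h0 : 0 ≤ i) (h1 : i < (pool.length : Int)) :
    (pvCountsB index cur).getD i 0
      = PySem.Set.len (PySem.Set.inter (PySem.List.pyGetD pool i []) cur) := by
  have hi : i.toNat < pool.length := by omega
  have hg : PySem.List.pyGetD pool i [] = pool[i.toNat] := PySem.List.pyGetD_eq_getElem pool [] h0 h1
  unfold pvCountsB
  rw [PySem.Dict.getD_counter, List.count_flatMap]
  have hmap : (List.map (List.count i ∘ fun e => index.getD e []) cur)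
      = cur.map (fun e => if e ∈ pool[i.toNat] then 1 else 0) := by
    refine List.map_congr_left (fun e _ => ?_)
    have h2 : i = (0 : Int) + (i.toNat : Int) := by omega
    have h3 := pvIdx_count pool 0 e i.toNat hi
    rw [getElem!_pos pool i.toNat hi] at h3
    simp only [Function.comp_apply]
    conv_lhs => rw [hidx e, h2]
    exact h3
  rw [hmap, pvSumIndicator, pvSymmCount _ cur (hp _ (pool.getElem_mem hi)) hcur]
  simp [PySem.Set.len, PySem.Set.inter, PySem.Set.contains, hg]

theorem pvMain (k : Int) (pool : List (PySem.Set String)) (index : PySem.Dict String (List Int))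
    (hp : ∀ a ∈ pool, List.Nodup a)
    (hidx : ∀ e, index.getD e [] = pvIdxList 0 pool e) :
    ∀ (n : Nat) (queue : List (PySem.Set String)) (alive : List Int) (acc : List (PySem.Set String)),
    queue.length + alive.length ≤ n →
    (∀ s ∈ queue, List.Nodup s) →
    (∀ i ∈ alive, 0 ≤ i ∧ i < (pool.length : Int)) →
    pvGoA k queue (alive.map (fun i => PySem.List.pyGetD pool i [])) acc
      = pvGoB k pool index queue alive acc := by
  intro n
  induction n with
  | zero =>
    intro queue alive acc hn _ _
    have : queue = [] := by cases queue <;> simp_all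
    subst this
    rw [pvGoA.eq_def, pvGoB.eq_def]
  | succ n ih =>
    intro queue alive acc hn hq halive
    match queue with
    | [] => rw [pvGoA.eq_def, pvGoB.eq_def]
    | cur :: rest =>
      rw [pvGoA.eq_def, pvGoB.eq_def]
      simp only []
      have hcur : List.Nodup cur := hq cur List.mem_cons_self
      have hkey : ∀ i ∈ alive, (pvCountsB index cur).getD i 0
          = PySem.Set.len (PySem.Set.inter (PySem.List.pyGetD pool i []) cur) :=
        fun i hi => pvCounts pool index hp hidx cur hcur i (halive i hi).1 (halive i hi).2
      have hA1 : (pvStepA k cur rest (alive.map (fun i => PySem.List.pyGetD pool i []))).1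
          = (pvStepB k pool index cur rest alive).1 := by
        rw [pvStepA_eq]
        simp only [pvStepB]
        congr 1
        rw [List.filter_map]
        congr 1
        refine List.filter_congr (fun i hi => ?_)
        simp only [Function.comp_apply, hkey i hi]
      have hA2 : (pvStepA k cur rest (alive.map (fun i => PySem.List.pyGetD pool i []))).2
          = ((pvStepB k pool index cur rest alive).2).map (fun i => PySem.List.pyGetD pool i []) := by
        rw [pvStepA_eq]
        simp only [pvStepB]
        rw [List.filter_map]
        congr 1
        refine List.filter_congr (fun i hi => ?_)
        simp only [Function.comp_apply, hkey i hi]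
        simp [← decide_not]
      rw [hA1, hA2]
      refine ih (pvStepB k pool index cur rest alive).1 (pvStepB k pool index cur rest alive).2
        (acc ++ [cur]) ?_ ?_ ?_
      · have := pvStepB_len k pool index cur rest alive
        have hlen : (cur :: rest).length + alive.length ≤ n + 1 := hn
        simp only [List.length_cons] at hlen
        omega
      · intro s hs
        simp only [pvStepB, List.mem_append] at hs
        rcases hs with hs | hs
        · exact hq s (List.mem_cons_of_mem _ hs)
        · obtain ⟨i, hi, rfl⟩ := List.mem_map.mp hs
          have hib := halive i (List.mem_of_mem_filter hi)
          rw [PySem.List.pyGetD_eq_getElem pool [] hib.1 hib.2]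
          exact hp _ (pool.getElem_mem (by omega))
      · intro i hi
        exact halive i (List.mem_of_mem_filter hi)

-- ===== VERDICT (by name: the statement is the Claim_ definition above) =====
theorem findsuspiciousactivities_spec : Claim_equal_findsuspiciousactivities := by
  intro sa na k _
  unfold Spec_findsuspiciousactivities findsuspiciousactivities findsuspiciousactivities_alt
  simp only []
  have hp : ∀ a ∈ na.map (fun a => PySem.Set.ofList a), List.Nodup a := by
    intro a ha
    obtain ⟨x, _, rfl⟩ := List.mem_map.mp ha
    exact PySem.Set.nodup_ofList x
  have hidx : ∀ e, ((PySem.List.enumerate (na.map (fun a => PySem.Set.ofList a))).foldl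
      (fun d p => p.2.foldl (fun d e => d.modify e [] (· ++ [p.1])) d) PySem.Dict.empty).getD e []
        = pvIdxList 0 (na.map (fun a => PySem.Set.ofList a)) e := by
    intro e
    rw [pvBuild _ hp 0 PySem.Dict.empty e, PySem.Dict.getD_empty]
    simp
  have hrange : ∀ i ∈ PySem.List.pyRange 0 (PySem.List.len (na.map (fun a => PySem.Set.ofList a))),
      0 ≤ i ∧ i < ((na.map (fun a => PySem.Set.ofList a)).length : Int) := by
    intro i hi
    have := PySem.List.mem_pyRange_one.mp hi
    simpa [PySem.List.len] using this
  have hq : ∀ s ∈ sa.map (fun s => PySem.Set.ofList s), List.Nodup s := by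
    intro s hs
    obtain ⟨x, _, rfl⟩ := List.mem_map.mp hs
    exact PySem.Set.nodup_ofList x
  conv_lhs => rw [← PySem.List.map_pyGetD_pyRange_zero (na.map (fun a => PySem.Set.ofList a)) ([] : PySem.Set String)]
  exact pvMain k _ _ hp hidx
    ((sa.map (fun s => PySem.Set.ofList s)).length
      + (PySem.List.pyRange 0 (PySem.List.len (na.map (fun a => PySem.Set.ofList a)))).length)
    _ _ [] le_rfl hq hrange
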